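-- pv_equiv track=rewrite | github.com/albertbuchard/forge | plugins/forge-hermes/forge_hermes/tools.py | _format_title_list
-- ===== SOURCE A (Python) =====
-- from typing import Any, Dict, Optional
--
-- def _normalize_text(value: Any) -> str:
--     return " ".join(str(value or "").split()).strip()
--
-- def _truncate_text(value: Any, limit: int = 96) -> str:
--     text = _normalize_text(value)
--     if len(text) <= limit:
--         return text
--     return f"{text[: max(0, limit - 1)].rstrip()}…"
--
-- def _safe_dict(value: Any) -> Dict[str, Any]:
--     return value if isinstance(value, dict) else {}
--
-- def _safe_list(value: Any) -> list[Any]: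
--     return value if isinstance(value, list) else []
--
-- def _format_title_list(items: Any, limit: int = 2) -> Optional[str]:
--     labels: list[str] = []
--     overflow = 0
--     for entry in _safe_list(items):
--         title = _truncate_text(_safe_dict(entry).get("title"), 54)
--         if not title:
--             continue
--         if len(labels) < limit:
--             labels.append(title)
--         else:
--             overflow += 1
--     if not labels:
--         return None
--     if overflow:
--         labels.append(f"+{overflow} more")
--     return "; ".join(labels)
-- ===== SOURCE B (Python) =====
-- from typing import Any, Dict, Optional
--
-- def _normalize_text(value: Any) -> str:
--     return " ".join(str(value or "").split()).strip()
--
-- def _truncate_text(value: Any, limit: int = 96) -> str: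
--     text = _normalize_text(value)
--     if len(text) <= limit:
--         return text
--     return f"{text[: max(0, limit - 1)].rstrip()}…"
--
-- def _safe_dict(value: Any) -> Dict[str, Any]:
--     return value if isinstance(value, dict) else {}
--
-- def _safe_list(value: Any) -> list[Any]:
--     return value if isinstance(value, list) else []
--
-- def _format_title_list(items: Any, limit: int = 2) -> Optional[str]:
--     def rec(entries: list, remaining: int) -> tuple:
--         # returns (joined kept titles or None, overflow count), built back-to-front
--         if not entries:
--             return None, 0
--         title = _truncate_text(_safe_dict(entries[0]).get("title"), 54)
--         if not title:
--             return rec(entries[1:], remaining)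
--         if remaining <= 0:
--             _, ov = rec(entries[1:], 0)
--             return None, ov + 1
--         rest, ov = rec(entries[1:], remaining - 1)
--         return (title if rest is None else f"{title}; {rest}"), ov
--     joined, overflow = rec(_safe_list(items), limit)
--     if joined is None:
--         return None
--     if overflow:
--         return f"{joined}; +{overflow} more"
--     return joined
-- ===== Notes on version B (the rewrite author's own statement) =====
-- stated objective: alternative
-- what changed: A runs an iterative loop that mutates a bounded labels list plus an overflow counter and finally joins the list; B is a recursive function over the entries that threads a remaining-capacity budget downward and builds the joined string back-to-front by direct concatenation during the unwind (no intermediate list, no join), returning the overflow count from the tail.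
import Mathlib
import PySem

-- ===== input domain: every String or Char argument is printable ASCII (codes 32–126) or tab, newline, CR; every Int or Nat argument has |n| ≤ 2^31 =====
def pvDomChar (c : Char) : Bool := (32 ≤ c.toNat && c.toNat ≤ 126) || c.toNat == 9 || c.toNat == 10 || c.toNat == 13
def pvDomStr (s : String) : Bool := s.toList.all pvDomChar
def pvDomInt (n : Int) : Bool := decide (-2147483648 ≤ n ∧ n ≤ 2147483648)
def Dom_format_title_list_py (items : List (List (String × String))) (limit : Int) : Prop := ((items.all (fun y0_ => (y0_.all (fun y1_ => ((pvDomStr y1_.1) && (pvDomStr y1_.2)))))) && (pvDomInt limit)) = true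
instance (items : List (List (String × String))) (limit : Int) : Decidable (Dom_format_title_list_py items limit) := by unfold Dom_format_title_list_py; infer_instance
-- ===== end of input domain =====

-- B replaces A's stateful loop (bounded labels list + overflow counter, joined at the end) by a
-- recursion over the entries that threads a remaining-capacity budget and builds the joined string
-- back-to-front by direct concatenation, returning the overflow count from the tail (same cost).

-- ===== PORT A =====
-- shared module helpers _normalize_text / _truncate_text (both Pythons call the same ones)
def pvNormalize (s : String) : String :=
  PySem.Str.strip (PySem.Str.join " " (PySem.Str.split₀ s))

def pvTruncate (s : String) (limit : Int) : String :=
  let text := pvNormalize s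
  if (PySem.Str.len text : Int) ≤ limit then text
  else PySem.Str.rstrip (PySem.Str.slice text none (some (max 0 (limit - 1)))) ++ "…"

-- _truncate_text(_safe_dict(entry).get("title"), 54); str(None or "") = "" when the key is absent
def pvTitle (entry : List (String × String)) : String :=
  pvTruncate ((PySem.Dict.get? (PySem.Dict.mk entry) "title").getD "") 54

-- one iteration of A's loop body
def pvStep (limit : Int) (acc : List String × Int) (entry : List (String × String)) :
    List String × Int :=
  let title := pvTitle entry
  if title = "" then acc
  else if (acc.1.length : Int) < limit then (acc.1 ++ [title], acc.2)
  else (acc.1, acc.2 + 1)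

def format_title_list_py (items : List (List (String × String))) (limit : Int) : Option String :=
  let st := items.foldl (pvStep limit) ([], 0)
  let labels := st.1
  let overflow := st.2
  if labels = [] then none
  else if overflow ≠ 0 then
    some (PySem.Str.join "; " (labels ++ ["+" ++ PySem.Int.toStr overflow ++ " more"]))
  else some (PySem.Str.join "; " labels)

-- ===== PORT B =====
-- B's inner recursive helper rec(entries, remaining) -> (joined-or-None, overflow)
def pvRecB : List (List (String × String)) → Int → Option String × Int
  | [], _ => (none, 0)
  | e :: tail, remaining =>
    let title := pvTitle e
    if title = "" then pvRecB tail remaining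
    else if remaining ≤ 0 then
      let r := pvRecB tail 0
      (none, r.2 + 1)
    else
      let r := pvRecB tail (remaining - 1)
      (some (match r.1 with
             | none => title
             | some rest => title ++ "; " ++ rest), r.2)

def format_title_list_py_alt (items : List (List (String × String))) (limit : Int) : Option String :=
  let r := pvRecB items limit
  match r.1 with
  | none => none
  | some joined =>
      if r.2 ≠ 0 then some (joined ++ "; +" ++ PySem.Int.toStr r.2 ++ " more")
      else some joined

-- ===== PRECONDITION & SPEC =====
def Spec_format_title_list_py (items : List (List (String × String))) (limit : Int) (out : Option String) : Prop := out = format_title_list_py_alt items limit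
instance (items : List (List (String × String))) (limit : Int) (out : Option String) : Decidable (Spec_format_title_list_py items limit out) := by unfold Spec_format_title_list_py; infer_instance

-- ===== CLAIM (what is proved, stated in full; the proofs are below) =====
def Claim_equal_format_title_list_py : Prop := ∀ (items : List (List (String × String))) (limit : Int), Dom_format_title_list_py items limit → Spec_format_title_list_py items limit (format_title_list_py items limit)

-- ===== LEMMAS AND PROOFS =====

-- A's loop in closed form: the labels are a prefix of the filtered titles, the overflow the rest.
theorem loopA_closed (items : List (List (String × String))) (limit : Int)
    (labels : List String) (ov : Int) :
    items.foldl (pvStep limit) (labels, ov) =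
    (labels ++ ((items.map pvTitle).filter (fun t => t ≠ "")).take
        (min (limit - labels.length).toNat ((items.map pvTitle).filter (fun t => t ≠ "")).length),
     ov + (((items.map pvTitle).filter (fun t => t ≠ "")).length -
        min (limit - labels.length).toNat ((items.map pvTitle).filter (fun t => t ≠ "")).length : Nat)) := by
  induction items generalizing labels ov with
  | nil => simp
  | cons e rest ih =>
    rw [List.foldl_cons]
    have hstep : pvStep limit (labels, ov) e =
        if pvTitle e = "" then (labels, ov)
        else if (labels.length : Int) < limit then (labels ++ [pvTitle e], ov)
        else (labels, ov + 1) := rfl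
    rw [hstep, List.map_cons]
    by_cases ht : pvTitle e = ""
    · rw [if_pos ht, ih]
      have hfil : (pvTitle e :: rest.map pvTitle).filter (fun t => decide (t ≠ "")) =
          (rest.map pvTitle).filter (fun t => decide (t ≠ "")) := by simp [ht]
      rw [hfil]
    · have hfil : (pvTitle e :: rest.map pvTitle).filter (fun t => decide (t ≠ "")) =
          pvTitle e :: (rest.map pvTitle).filter (fun t => decide (t ≠ "")) := by simp [ht]
      rw [if_neg ht, hfil]
      set X := (rest.map pvTitle).filter (fun t => decide (t ≠ "")) with hX
      by_cases hlt : (labels.length : Int) < limit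
      · rw [if_pos hlt, ih]
        have hk : min (limit - ((labels ++ [pvTitle e]).length : Int)).toNat X.length + 1 =
            min (limit - (labels.length : Int)).toNat (pvTitle e :: X).length := by
          simp only [List.length_append, List.length_cons, List.length_nil]
          push_cast
          omega
        rw [Prod.mk.injEq]
        refine ⟨?_, ?_⟩
        · rw [← hk, List.take_succ_cons, List.append_assoc]
          rfl
        · rw [← hk]
          simp only [List.length_cons]
          omega
      · rw [if_neg hlt, ih]
        have h0 : (limit - (labels.length : Int)).toNat = 0 := by omega
        rw [Prod.mk.injEq]
        refine ⟨?_, ?_⟩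
        · rw [h0]
          simp
        · rw [h0]
          simp only [List.length_cons]
          omega

theorem take_min_eq (F : List String) (a : Nat) : F.take (min a F.length) = F.take a := by
  rcases le_total a F.length with h | h
  · rw [min_eq_left h]
  · rw [min_eq_right h, List.take_length, List.take_of_length_le h]

-- string-level facts about "; ".join
theorem joinS_singleton (t : String) : PySem.Str.join "; " [t] = t := by
  apply String.ext
  rw [PySem.Str.toList_join]
  simp [PySem.Chars.join_singleton]

theorem joinS_cons (t u : String) (ts : List String) :
    PySem.Str.join "; " (t :: u :: ts) = t ++ "; " ++ PySem.Str.join "; " (u :: ts) := by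
  apply String.ext
  rw [PySem.Str.toList_join]
  simp only [List.map_cons]
  rw [PySem.Chars.join_cons_cons]
  simp [PySem.Str.toList_join]

theorem joinS_append_singleton (l : List String) (x : String) (h : l ≠ []) :
    PySem.Str.join "; " (l ++ [x]) = PySem.Str.join "; " l ++ "; " ++ x := by
  induction l with
  | nil => exact absurd rfl h
  | cons t ts ih =>
    cases ts with
    | nil => rw [joinS_singleton]; simp [joinS_cons, joinS_singleton]
    | cons u us =>
      have h' : u :: us ≠ [] := by simp
      have ih' := ih h'
      rw [List.cons_append] at ih'
      rw [List.cons_append, List.cons_append, joinS_cons t u (us ++ [x]), ih',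
        joinS_cons t u us]
      simp [String.append_assoc]

-- joined-or-None of a kept list
def optJoin : List String → Option String
  | [] => none
  | l => some (PySem.Str.join "; " l)

-- B's recursion in closed form over the same filtered-title list
theorem recB_closed (items : List (List (String × String))) (remaining : Int) :
    pvRecB items remaining =
    (optJoin (((items.map pvTitle).filter (fun t => t ≠ "")).take remaining.toNat),
     ((((items.map pvTitle).filter (fun t => t ≠ "")).length -
        min remaining.toNat ((items.map pvTitle).filter (fun t => t ≠ "")).length : Nat) : Int)) := by
  induction items generalizing remaining with
  | nil => simp [pvRecB, optJoin]
  | cons e rest ih =>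
    rw [List.map_cons]
    by_cases ht : pvTitle e = ""
    · have hfil : (pvTitle e :: rest.map pvTitle).filter (fun t => decide (t ≠ "")) =
          (rest.map pvTitle).filter (fun t => decide (t ≠ "")) := by simp [ht]
      rw [show pvRecB (e :: rest) remaining = pvRecB rest remaining by
        simp [pvRecB, ht]]
      rw [ih, hfil]
    · have hfil : (pvTitle e :: rest.map pvTitle).filter (fun t => decide (t ≠ "")) =
          pvTitle e :: (rest.map pvTitle).filter (fun t => decide (t ≠ "")) := by simp [ht]
      rw [hfil]
      set X := (rest.map pvTitle).filter (fun t => decide (t ≠ "")) with hX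
      by_cases hr : remaining ≤ 0
      · have hstep : pvRecB (e :: rest) remaining = (none, (pvRecB rest 0).2 + 1) := by
          simp [pvRecB, ht, hr]
        rw [hstep, ih 0]
        have h0 : remaining.toNat = 0 := by omega
        rw [h0]
        simp only [List.take_zero, optJoin, Int.toNat_zero, Nat.zero_min,
          List.length_cons]
        rw [Prod.mk.injEq]
        refine ⟨rfl, by omega⟩
      · have hstep : pvRecB (e :: rest) remaining =
            (some (match (pvRecB rest (remaining - 1)).1 with
                   | none => pvTitle e
                   | some s => pvTitle e ++ "; " ++ s), (pvRecB rest (remaining - 1)).2) := by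
          simp [pvRecB, ht, hr]
        rw [hstep, ih (remaining - 1)]
        have htn : remaining.toNat = (remaining - 1).toNat + 1 := by omega
        rw [htn, List.take_succ_cons]
        rw [Prod.mk.injEq]
        constructor
        · cases hXt : X.take (remaining - 1).toNat with
          | nil => simp [optJoin, joinS_singleton]
          | cons q qs => simp [optJoin, joinS_cons]
        · simp only [List.length_cons]
          omega

theorem optJoin_of_ne_nil (l : List String) (h : l ≠ []) :
    optJoin l = some (PySem.Str.join "; " l) := by
  cases l with
  | nil => exact absurd rfl h
  | cons a as => rfl

theorem str_regroup (a s : String) :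
    a ++ "; " ++ ("+" ++ s ++ " more") = a ++ "; +" ++ s ++ " more" := by
  have h : ("; " : String) ++ "+" = "; +" := rfl
  simp only [String.append_assoc]
  rw [← h, String.append_assoc]

-- ===== VERDICT (by name: the statement is the Claim_ definition above) =====
theorem format_title_list_py_spec : Claim_equal_format_title_list_py := by
  intro items limit _
  unfold Spec_format_title_list_py format_title_list_py format_title_list_py_alt
  rw [loopA_closed, recB_closed]
  set F := (items.map pvTitle).filter (fun t => t ≠ "") with hF
  simp only [List.length_nil, Nat.cast_zero, Int.sub_zero, List.nil_append, zero_add]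
  rw [take_min_eq]
  set K := F.take limit.toNat with hK
  by_cases hne : K = []
  · simp [hne, optJoin]
  · rw [optJoin_of_ne_nil K hne]
    dsimp only
    rw [if_neg hne]
    by_cases h0 : ((F.length - min limit.toNat F.length : Nat) : Int) ≠ 0
    · rw [if_pos h0, if_pos h0, joinS_append_singleton K _ hne]
      exact congrArg some (str_regroup _ _)
    · rw [if_neg h0, if_neg h0]
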